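-- pv_equiv track=rewrite | github.com/jesusjarr30/python-sniffer | programa de redes.py | acomodo
-- ===== SOURCE A (Python) =====
-- def acomodo(cadena):#Funcion para poner comas a los datos del tcp
--     aux=""
--     numero=len(cadena)
--
--     for x in range(0,numero,2):
--         aux+=cadena[x]
--         aux+=cadena[x+1]
--         if(x+2!=numero):
--             aux+=":"
--     return aux
-- ===== SOURCE B (Python) =====
-- def acomodo(cadena):
--     return ":".join(cadena[i:i+2] for i in range(0, len(cadena), 2))
-- ===== Notes on version B (the rewrite author's own statement) =====
-- stated objective: idiomatic
-- what changed: Replaces the manual accumulator loop with its x+2!=numero separator branch by a single ':'.join over the two-character slices cadena[i:i+2]; on odd-length strings, where A raises IndexError, B returns the string with the lone final character as the last group (outside Pre_).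
-- outside the precondition, e.g. on acomodo(':'): A raises IndexError, B returns ':'
import Mathlib
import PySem

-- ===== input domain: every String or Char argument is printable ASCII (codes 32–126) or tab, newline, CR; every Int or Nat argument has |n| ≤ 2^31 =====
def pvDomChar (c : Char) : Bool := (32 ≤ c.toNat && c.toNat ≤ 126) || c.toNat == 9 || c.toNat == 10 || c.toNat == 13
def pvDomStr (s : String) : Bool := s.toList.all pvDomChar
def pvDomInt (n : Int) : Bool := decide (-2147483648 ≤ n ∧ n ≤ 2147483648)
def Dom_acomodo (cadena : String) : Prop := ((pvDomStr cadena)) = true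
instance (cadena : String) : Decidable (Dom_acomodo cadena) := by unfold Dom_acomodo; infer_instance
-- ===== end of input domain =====

-- B replaces A's accumulator loop and separator branch by ':'.join over two-character
-- slices (idiomatic); equal on even-length strings (A raises IndexError on odd lengths).

-- ===== PORT A =====
def acomodo (cadena : String) : String :=
  let cs := cadena.toList
  let numero : Int := PySem.Str.len cadena
  let aux : List Char :=
    (PySem.List.pyRange 0 numero 2).foldl (fun aux x =>
      let aux := aux ++ [PySem.List.pyGetD cs x ' ']
      let aux := aux ++ [PySem.List.pyGetD cs (x + 1) ' ']
      if x + 2 ≠ numero then aux ++ [':'] else aux) []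
  String.ofList aux

-- ===== PORT B =====
def acomodo_alt (cadena : String) : String :=
  PySem.Str.join ":" ((PySem.List.pyRange 0 (PySem.Str.len cadena) 2).map
    (fun i => PySem.Str.slice cadena (some i) (some (i + 2))))

-- ===== PRECONDITION & SPEC =====
-- Pre_ excludes exactly the odd-length strings, on which A raises IndexError (cadena[x+1]).
def Pre_acomodo (cadena : String) : Prop := cadena.toList.length % 2 = 0
instance (cadena : String) : Decidable (Pre_acomodo cadena) := by unfold Pre_acomodo; infer_instance
def pvWitness_acomodo : String := ("abcd")

def Spec_acomodo (cadena : String) (out : String) : Prop := out = acomodo_alt cadena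
instance (cadena : String) (out : String) : Decidable (Spec_acomodo cadena out) := by unfold Spec_acomodo; infer_instance

-- ===== CLAIM (what is proved, stated in full; the proofs are below) =====
def Claim_equal_acomodo : Prop := ∀ (cadena : String), Dom_acomodo cadena → Pre_acomodo cadena → Spec_acomodo cadena (acomodo cadena)

-- ===== LEMMAS AND PROOFS =====

-- the common colon-grouping of an (even-length) character list
def gFun : List Char → List Char
  | [] => []
  | [a] => [a]
  | [a, b] => [a, b]
  | a :: b :: c :: rest => a :: b :: ':' :: gFun (c :: rest)

lemma pyRange_pos_nil (a b s : Int) (hs : 0 < s) (h : b ≤ a) :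
    PySem.List.pyRange a b s = [] := by
  rw [PySem.List.pyRange_of_pos a b hs, if_neg (by omega)]
  simp

lemma pyRange_two_cons (a b : Int) (h : a < b) :
    PySem.List.pyRange a b 2 = a :: PySem.List.pyRange (a + 2) b 2 := by
  rw [PySem.List.pyRange_of_pos a b (by norm_num), PySem.List.pyRange_of_pos (a + 2) b (by norm_num)]
  by_cases h2 : a + 2 < b
  · rw [if_pos h, if_pos h2]
    have hm : ((b - a + 2 - 1) / 2).toNat = ((b - (a + 2) + 2 - 1) / 2).toNat + 1 := by omega
    rw [hm, List.range_succ_eq_map, List.map_cons, List.map_map]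
    refine congrArg₂ _ (by ring) (List.map_congr_left fun k _ => ?_)
    simp only [Function.comp]
    push_cast
    ring
  · rw [if_pos h, if_neg h2]
    have hm : ((b - a + 2 - 1) / 2).toNat = 1 := by omega
    rw [hm]
    simp

lemma join_cons_of_ne_nil (sep p : List Char) (L : List (List Char)) (h : L ≠ []) :
    PySem.Chars.join sep (p :: L) = p ++ sep ++ PySem.Chars.join sep L := by
  cases L with
  | nil => exact absurd rfl h
  | cons q rest => exact PySem.Chars.join_cons_cons sep p q rest

lemma loopA (cs : List Char) :
    ∀ (suf t : List Char), cs = t ++ suf → suf.length % 2 = 0 → ∀ aux : List Char,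
    (PySem.List.pyRange (↑t.length) (↑cs.length) 2).foldl (fun aux x =>
      let aux := aux ++ [PySem.List.pyGetD cs x ' ']
      let aux := aux ++ [PySem.List.pyGetD cs (x + 1) ' ']
      if x + 2 ≠ (↑cs.length : Int) then aux ++ [':'] else aux) aux
    = aux ++ gFun suf := by
  intro suf
  induction suf using gFun.induct with
  | case1 =>
    intro t hcs _ aux
    have ht : t = cs := by simpa using hcs.symm
    rw [ht, pyRange_pos_nil _ _ _ (by norm_num) le_rfl]
    simp [gFun]
  | case2 a =>
    intro t hcs heven aux
    simp at heven
  | case3 a b =>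
    intro t hcs _ aux
    have hlen : cs.length = t.length + 2 := by subst hcs; simp
    rw [pyRange_two_cons _ _ (by push_cast [hlen]; omega)]
    rw [pyRange_pos_nil _ _ _ (by norm_num) (by push_cast [hlen]; omega)]
    simp only [List.foldl_cons, List.foldl_nil]
    have hga : PySem.List.pyGetD cs (↑t.length) ' ' = a := by
      rw [PySem.List.pyGetD_of_nonneg _ _ (by positivity), Int.toNat_natCast]
      subst hcs
      simp [List.getD_eq_getElem?_getD]
    have hgb : PySem.List.pyGetD cs ((↑t.length : Int) + 1) ' ' = b := by
      rw [PySem.List.pyGetD_of_nonneg _ _ (by positivity)]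
      have : ((↑t.length : Int) + 1).toNat = t.length + 1 := by omega
      rw [this]
      subst hcs
      simp [List.getD_eq_getElem?_getD]
    rw [hga, hgb]
    rw [if_neg (by push_cast [hlen]; omega)]
    simp [gFun]
  | case4 a b c rest ih =>
    intro t hcs heven aux
    have hlen : cs.length = t.length + (rest.length + 3) := by subst hcs; simp
    have hlt : (↑t.length : Int) < ↑cs.length := by push_cast [hlen]; omega
    rw [pyRange_two_cons _ _ hlt]
    simp only [List.foldl_cons]
    have hga : PySem.List.pyGetD cs (↑t.length) ' ' = a := by
      rw [PySem.List.pyGetD_of_nonneg _ _ (by positivity), Int.toNat_natCast]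
      subst hcs
      simp [List.getD_eq_getElem?_getD]
    have hgb : PySem.List.pyGetD cs ((↑t.length : Int) + 1) ' ' = b := by
      rw [PySem.List.pyGetD_of_nonneg _ _ (by positivity)]
      have : ((↑t.length : Int) + 1).toNat = t.length + 1 := by omega
      rw [this]
      subst hcs
      simp [List.getD_eq_getElem?_getD]
    rw [hga, hgb]
    rw [if_pos (by push_cast [hlen]; omega)]
    have hcs' : cs = (t ++ [a, b]) ++ (c :: rest) := by simpa using hcs
    have heven' : (c :: rest).length % 2 = 0 := by simp at heven ⊢; omega
    have hstart : ((t ++ [a, b]).length : Int) = (↑t.length : Int) + 2 := by simp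
    have := ih (t ++ [a, b]) hcs' heven' ((aux ++ [a] ++ [b]) ++ [':'])
    rw [hstart] at this
    rw [this]
    simp [gFun]

lemma loopB (cs : List Char) :
    ∀ (suf t : List Char), cs = t ++ suf → suf.length % 2 = 0 →
    PySem.Chars.join [':'] ((PySem.List.pyRange (↑t.length) (↑cs.length) 2).map
      (fun i => PySem.List.slice cs (some i) (some (i + 2))))
    = gFun suf := by
  intro suf
  induction suf using gFun.induct with
  | case1 =>
    intro t hcs _
    have ht : t = cs := by simpa using hcs.symm
    rw [ht, pyRange_pos_nil _ _ _ (by norm_num) le_rfl]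
    simp [gFun, PySem.Chars.join_nil]
  | case2 a =>
    intro t hcs heven
    simp at heven
  | case3 a b =>
    intro t hcs _
    have hlen : cs.length = t.length + 2 := by subst hcs; simp
    rw [pyRange_two_cons _ _ (by push_cast [hlen]; omega)]
    rw [pyRange_pos_nil _ _ _ (by norm_num) (by push_cast [hlen]; omega)]
    have hsl : PySem.List.slice cs (some ↑t.length) (some (↑t.length + 2)) = [a, b] := by
      have h2 : ((2 : Int)) = ((2 : Nat) : Int) := by norm_num
      rw [h2, PySem.List.slice_natCast_add cs t.length 2]
      subst hcs
      simp [List.drop_left']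
    simp [hsl, PySem.Chars.join_singleton, gFun]
  | case4 a b c rest ih =>
    intro t hcs heven
    have hlen : cs.length = t.length + (rest.length + 3) := by subst hcs; simp
    have hlt : (↑t.length : Int) < ↑cs.length := by push_cast [hlen]; omega
    rw [pyRange_two_cons _ _ hlt, List.map_cons]
    have hne : ((PySem.List.pyRange ((↑t.length : Int) + 2) (↑cs.length) 2).map
        (fun i => PySem.List.slice cs (some i) (some (i + 2)))) ≠ [] := by
      rw [pyRange_two_cons _ _ (by push_cast [hlen]; omega)]
      simp
    rw [join_cons_of_ne_nil _ _ _ hne]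
    have hsl : PySem.List.slice cs (some ↑t.length) (some (↑t.length + 2)) = [a, b] := by
      have h2 : ((2 : Int)) = ((2 : Nat) : Int) := by norm_num
      rw [h2, PySem.List.slice_natCast_add cs t.length 2]
      subst hcs
      simp [List.drop_left']
    have hcs' : cs = (t ++ [a, b]) ++ (c :: rest) := by simpa using hcs
    have heven' : (c :: rest).length % 2 = 0 := by simp at heven ⊢; omega
    have hstart : ((t ++ [a, b]).length : Int) = (↑t.length : Int) + 2 := by simp
    have := ih (t ++ [a, b]) hcs' heven'
    rw [hstart] at this
    rw [hsl, this]
    simp [gFun]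

-- ===== VERDICT (by name: the statement is the Claim_ definition above) =====
theorem acomodo_spec : Claim_equal_acomodo := by
  intro cadena _ hpre
  unfold Spec_acomodo
  have hA := loopA cadena.toList cadena.toList [] (by simp) hpre []
  have hB := loopB cadena.toList cadena.toList [] (by simp) hpre
  simp only [List.length_nil, Nat.cast_zero] at hA hB
  have e1 : (acomodo cadena).toList = [] ++ gFun cadena.toList := by
    unfold acomodo
    simp only [PySem.Str.len_eq, String.toList_ofList]
    exact hA
  have e2 : (acomodo_alt cadena).toList = gFun cadena.toList := by
    unfold acomodo_alt
    rw [PySem.Str.toList_join, List.map_map]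
    simp only [PySem.Str.len_eq]
    have hmap : (PySem.List.pyRange 0 (↑cadena.toList.length) 2).map
        (String.toList ∘ fun i => PySem.Str.slice cadena (some i) (some (i + 2)))
        = (PySem.List.pyRange 0 (↑cadena.toList.length) 2).map
        (fun i => PySem.List.slice cadena.toList (some i) (some (i + 2))) := by
      refine List.map_congr_left fun i _ => ?_
      simp [Function.comp, PySem.Str.toList_slice, PySem.Chars.slice_eq_listSlice]
    rw [show (":" : String).toList = [':'] from rfl, hmap]
    exact hB
  rw [← String.toList_inj, e1, e2]
  simp
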